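-- pv_equiv track=rewrite | github.com/tigantic/physics-os | apps/qtenet/src/qtenet/qtenet/solvers/vlasov_genuine.py | _v_bit_sites
-- ===== SOURCE A (Python) =====
-- def _v_bit_sites(
--     num_qubits_total: int, num_dims: int, v_axis: int
-- ) -> list[tuple[int, int]]:
--     """Return (site_index, weight_in_velocity_index) for each velocity bit.
--
--     The weight is 2^(bit_level) where bit_level is the position of that bit
--     within the velocity coordinate (0 = LSB, L-1 = MSB).
--
--     For 2D with L=5 qubits_per_dim:
--       site 0 → v-bit level 4  weight 16 (MSB)
--       site 2 → v-bit level 3  weight 8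
--       site 4 → v-bit level 2  weight 4
--       site 6 → v-bit level 1  weight 2
--       site 8 → v-bit level 0  weight 1 (LSB)
--     """
--     result = []
--     for k in range(num_qubits_total):
--         morton_bit = num_qubits_total - 1 - k
--         if morton_bit % num_dims == v_axis:
--             bit_level = morton_bit // num_dims
--             result.append((k, 1 << bit_level))
--     return result
-- ===== SOURCE B (Python) =====
-- def _v_bit_sites(
--     num_qubits_total: int, num_dims: int, v_axis: int
-- ) -> list[tuple[int, int]]:
--     """Return (site_index, weight_in_velocity_index) for each velocity bit.
--
--     Axes are indexed 0..num_dims-1; the Morton bits belonging to axis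
--     ``v_axis`` are exactly ``v_axis, v_axis + num_dims, v_axis + 2*num_dims,
--     ...``, so iterate over that arithmetic progression directly: the
--     enumeration index is the bit level, and a final reverse restores
--     ascending site order.
--     """
--     if not (0 <= v_axis < num_dims):
--         return []  # no such axis, hence no bits
--     sites = [
--         (num_qubits_total - 1 - mb, 1 << level)
--         for level, mb in enumerate(range(v_axis, num_qubits_total, num_dims))
--     ]
--     sites.reverse()
--     return sites
-- ===== Notes on version B (the rewrite author's own statement) =====
-- stated objective: faster
-- what changed: B iterates directly over the matching Morton bits as an arithmetic progression (a comprehension over range(v_axis, num_qubits_total, num_dims) with the enumeration index as the bit level, reversed at the end) instead of scanning every site and filtering by the residue with a floor division per hit; Pre_ excludes num_dims <= 0, outside the natural domain of a dimension count, where A raises on most inputs (ZeroDivisionError for num_dims = 0, negative shift count for num_dims < 0) and its residual values are accidental.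
-- outside the precondition, e.g. on _v_bit_sites(1, -2, 0): A returns [(0, 1)], B returns []; on _v_bit_sites(-3, 0, 5): A returns [], B returns []
import Mathlib
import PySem

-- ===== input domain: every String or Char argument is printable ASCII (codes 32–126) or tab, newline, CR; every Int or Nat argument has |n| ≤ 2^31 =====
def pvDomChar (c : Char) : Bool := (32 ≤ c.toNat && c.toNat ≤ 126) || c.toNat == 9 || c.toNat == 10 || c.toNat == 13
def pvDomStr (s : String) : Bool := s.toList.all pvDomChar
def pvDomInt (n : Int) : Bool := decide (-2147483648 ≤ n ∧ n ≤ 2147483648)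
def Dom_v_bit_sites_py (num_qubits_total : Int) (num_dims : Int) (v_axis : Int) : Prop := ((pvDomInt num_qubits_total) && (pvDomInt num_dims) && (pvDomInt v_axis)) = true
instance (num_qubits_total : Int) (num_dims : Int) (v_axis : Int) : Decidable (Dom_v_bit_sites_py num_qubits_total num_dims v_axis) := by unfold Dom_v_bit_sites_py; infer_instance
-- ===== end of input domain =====

-- B replaces A's scan over every site (filter by Morton-bit residue, floor division per hit)
-- by a direct comprehension over the matching Morton bits as an arithmetic progression,
-- with the enumeration index as the bit level and a final reverse restoring ascending site order.

-- ===== PORT A =====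
-- `1 << bit_level` raises in Python when bit_level < 0 (only reachable for num_dims < 0,
-- which Pre_ excludes); the port uses `.toNat` there.
def v_bit_sites_py (num_qubits_total : Int) (num_dims : Int) (v_axis : Int) : List (Int × Int) :=
  (PySem.List.pyRange 0 num_qubits_total 1).foldl
    (fun result k =>
      let morton_bit := num_qubits_total - 1 - k
      if PySem.Int.mod morton_bit num_dims = v_axis then
        result ++ [(k, (1 : Int) <<< (PySem.Int.floordiv morton_bit num_dims).toNat)]
      else result) []

-- ===== PORT B =====
def v_bit_sites_py_alt (num_qubits_total : Int) (num_dims : Int) (v_axis : Int) : List (Int × Int) :=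
  if ¬ (0 ≤ v_axis ∧ v_axis < num_dims) then []
  else ((PySem.List.enumerate (PySem.List.pyRange v_axis num_qubits_total num_dims)).map
      (fun p => (num_qubits_total - 1 - p.2, (1 : Int) <<< (p.1.toNat : Int)))).reverse

-- ===== PRECONDITION & SPEC =====
-- Pre_ excludes num_dims ≤ 0, outside the natural domain of a dimension count: A raises there
-- on most inputs (ZeroDivisionError for num_dims = 0 with num_qubits_total > 0, negative shift
-- count for num_dims < 0 whenever a positive Morton bit matches) and its residual values are
-- accidental.
def Pre_v_bit_sites_py (num_qubits_total : Int) (num_dims : Int) (v_axis : Int) : Prop :=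
  0 < num_dims
instance (num_qubits_total : Int) (num_dims : Int) (v_axis : Int) : Decidable (Pre_v_bit_sites_py num_qubits_total num_dims v_axis) := by unfold Pre_v_bit_sites_py; infer_instance

def pvWitness_v_bit_sites_py : Int × Int × Int := (10, 2, 0)

def Spec_v_bit_sites_py (num_qubits_total : Int) (num_dims : Int) (v_axis : Int) (out : List (Int × Int)) : Prop := out = v_bit_sites_py_alt num_qubits_total num_dims v_axis
instance (num_qubits_total : Int) (num_dims : Int) (v_axis : Int) (out : List (Int × Int)) : Decidable (Spec_v_bit_sites_py num_qubits_total num_dims v_axis out) := by unfold Spec_v_bit_sites_py; infer_instance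

-- ===== CLAIM (what is proved, stated in full; the proofs are below) =====
def Claim_equal_v_bit_sites_py : Prop := ∀ (num_qubits_total : Int) (num_dims : Int) (v_axis : Int), Dom_v_bit_sites_py num_qubits_total num_dims v_axis → Pre_v_bit_sites_py num_qubits_total num_dims v_axis → Spec_v_bit_sites_py num_qubits_total num_dims v_axis (v_bit_sites_py num_qubits_total num_dims v_axis)

-- ===== LEMMAS AND PROOFS =====

-- A's per-Morton-bit filter/emit function, after the change of variable mb = n-1-k.
def pvG (nq nd va : Int) : Int → Option (Int × Int) :=
  fun mb => if PySem.Int.mod mb nd = va then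
      some (nq - 1 - mb, (1 : Int) <<< (PySem.Int.floordiv mb nd).toNat)
    else none

-- B's per-(level, Morton-bit) emit function.
def pvg (nq : Int) : Int × Int → Int × Int := fun p => (nq - 1 - p.2, (1 : Int) <<< (p.1.toNat : Int))

theorem pv_foldl_filterMap (nq nd va : Int) :
    ∀ (l : List Int) (acc : List (Int × Int)),
      l.foldl (fun result k =>
        let morton_bit := nq - 1 - k
        if PySem.Int.mod morton_bit nd = va then
          result ++ [(k, (1 : Int) <<< (PySem.Int.floordiv morton_bit nd).toNat)]
        else result) acc
      = acc ++ l.filterMap (fun k => pvG nq nd va (nq - 1 - k)) := by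
  intro l
  induction l with
  | nil => intro acc; simp
  | cons x xs ih =>
    intro acc
    simp only [List.foldl_cons, List.filterMap_cons, ih, pvG]
    split <;> simp

theorem pv_map_sub_pyRange (nq : Int) :
    (PySem.List.pyRange 0 nq 1).map (fun k => nq - 1 - k) = (PySem.List.pyRange 0 nq 1).reverse := by
  rw [PySem.List.pyRange_one]
  apply List.ext_getElem
  · simp
  · intro i h1 h2
    simp only [List.getElem_map, List.getElem_reverse, List.getElem_range, List.length_map,
      List.length_range]
    simp only [List.length_map, List.length_reverse, List.length_range] at h1 h2
    omega

theorem pvA_eq (nq nd va : Int) :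
    v_bit_sites_py nq nd va = ((PySem.List.pyRange 0 nq 1).filterMap (pvG nq nd va)).reverse := by
  show (PySem.List.pyRange 0 nq 1).foldl _ [] = _
  rw [pv_foldl_filterMap, List.nil_append]
  have h1 : (fun k => pvG nq nd va (nq - 1 - k)) = pvG nq nd va ∘ (fun k => nq - 1 - k) := rfl
  rw [h1, ← List.filterMap_map, pv_map_sub_pyRange, List.filterMap_reverse]

theorem pv_mod_fix_pos {x b : Int} (hb : 0 < b) (h0 : 0 ≤ x) (h1 : x < b) :
    PySem.Int.mod x b = x := by
  rw [PySem.Int.mod_eq_emod_of_pos hb]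
  exact Int.emod_eq_of_lt h0 h1

theorem pv_dvd_sub_of_mod_eq {a b v : Int} (h : PySem.Int.mod a b = v) : b ∣ a - v := by
  refine ⟨PySem.Int.floordiv a b, ?_⟩
  have := PySem.Int.floordiv_mul_add_mod a b
  rw [h] at this
  linarith [this]

theorem pv_aux_count {nd t : Int} (hnd : 0 < nd) (_ht : 0 ≤ t) : (nd * t + nd - 1) / nd = t := by
  have h1 : nd * t + nd - 1 = (nd - 1) + nd * t := by ring
  rw [h1, Int.add_mul_ediv_left _ _ (ne_of_gt hnd),
    Int.ediv_eq_zero_of_lt (by omega) (by omega)]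
  omega

-- one more stop value appends one more matching Morton bit
theorem pv_step {nd va : Int} (hnd : 0 < nd) (hva0 : 0 ≤ va) (hvalt : va < nd)
    {m : Int} (hm : 0 ≤ m) :
    PySem.List.pyRange va (m + 1) nd =
      PySem.List.pyRange va m nd ++ (if PySem.Int.mod m nd = va then [m] else []) := by
  rw [PySem.List.pyRange_of_pos _ _ hnd, PySem.List.pyRange_of_pos _ _ hnd]
  by_cases hc : PySem.Int.mod m nd = va
  · obtain ⟨t, ht⟩ := pv_dvd_sub_of_mod_eq hc
    have ht0 : 0 ≤ t := by nlinarith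
    have hvam : va ≤ m := by nlinarith
    rw [if_pos hc, if_pos (by omega : va < m + 1)]
    have e1 : m + 1 - va + nd - 1 = nd * (t + 1) := by
      have : nd * (t + 1) = nd * t + nd := by ring
      omega
    rw [e1, Int.mul_ediv_cancel_left _ (ne_of_gt hnd)]
    by_cases hvm : va < m
    · have ht1 : 1 ≤ t := by nlinarith
      rw [if_pos hvm]
      have e0 : m - va + nd - 1 = nd * t + nd - 1 := by omega
      rw [e0, pv_aux_count hnd ht0]
      have e2 : (t + 1).toNat = t.toNat + 1 := by omega
      rw [e2, List.range_succ, List.map_append]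
      congr 1
      simp only [List.map_cons, List.map_nil]
      congr 1
      have : (t.toNat : Int) = t := by omega
      rw [this]; omega
    · have hm_eq : m = va := by omega
      have ht0' : t = 0 := by nlinarith
      rw [if_neg hvm]
      subst hm_eq ht0'
      simp
  · rw [if_neg hc, List.append_nil]
    by_cases hvm1 : va < m + 1
    · have hvm : va < m := by
        rcases lt_or_eq_of_le (by omega : va ≤ m) with h | h
        · exact h
        · exact absurd (h ▸ pv_mod_fix_pos hnd hva0 hvalt) hc
      rw [if_pos hvm1, if_pos hvm]
      have hndvd : ¬ nd ∣ (m - va) := by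
        intro ⟨t, ht⟩
        apply hc
        have : m = va + nd * t := by omega
        rw [this, PySem.Int.mod_eq_emod_of_pos hnd, Int.add_mul_emod_self_left]
        exact Int.emod_eq_of_lt hva0 hvalt
      suffices h : (m + 1 - va + nd - 1) / nd = (m - va + nd - 1) / nd by rw [h]
      set D := m - va + nd - 1 with hD
      have hqr := Int.mul_ediv_add_emod D nd
      have hr0 := Int.emod_nonneg D (ne_of_gt hnd)
      have hrlt := Int.emod_lt_of_pos D hnd
      set q := D / nd with hq
      set r := D % nd with hr
      have hrne : r + 1 ≠ nd := by
        intro he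
        apply hndvd
        exact ⟨q, by omega⟩
      have e3 : m + 1 - va + nd - 1 = (r + 1) + nd * q := by omega
      rw [e3, Int.add_mul_ediv_left _ _ (ne_of_gt hnd),
        Int.ediv_eq_zero_of_lt (by omega) (by omega)]
      omega
    · rw [if_neg hvm1, if_neg (by omega : ¬ va < m)]

theorem pv_len {nd va : Int} (hnd : 0 < nd) (_hva0 : 0 ≤ va) (hvalt : va < nd)
    {m : Int} (hm : 0 ≤ m) (hc : PySem.Int.mod m nd = va) :
    ((PySem.List.pyRange va m nd).length : Int) = PySem.Int.floordiv m nd := by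
  obtain ⟨t, ht⟩ := pv_dvd_sub_of_mod_eq hc
  have ht' : PySem.Int.floordiv m nd = t := by
    have h1 := PySem.Int.floordiv_mul_add_mod m nd
    rw [hc] at h1
    have h2 : PySem.Int.floordiv m nd * nd = t * nd := by
      have c1 : t * nd = nd * t := mul_comm t nd
      omega
    exact mul_right_cancel₀ (ne_of_gt hnd) h2
  have ht0 : 0 ≤ t := by nlinarith
  rw [PySem.List.pyRange_of_pos _ _ hnd, ht', List.length_map, List.length_range]
  by_cases hvm : va < m
  · rw [if_pos hvm]
    have e0 : m - va + nd - 1 = nd * t + nd - 1 := by omega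
    rw [e0, pv_aux_count hnd ht0]
    omega
  · have hmva : m = va := by nlinarith
    have htz : t = 0 := by
      have : nd * t = 0 := by omega
      rcases mul_eq_zero.mp this with h | h
      · omega
      · exact h
    rw [if_neg hvm]
    omega

theorem pv_core_pos {nq nd va : Int} (hnd : 0 < nd) (hva0 : 0 ≤ va) (hvalt : va < nd) :
    ∀ n : Nat, (PySem.List.pyRange 0 (n : Int) 1).filterMap (pvG nq nd va)
      = (PySem.List.enumerate (PySem.List.pyRange va (n : Int) nd)).map (pvg nq) := by
  intro n
  induction n with
  | zero =>
    simp only [Nat.cast_zero]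
    rw [PySem.List.pyRange_one_eq_nil le_rfl, PySem.List.pyRange_of_pos _ _ hnd,
      if_neg (by omega : ¬ va < (0:Int))]
    simp [PySem.List.enumerate_nil]
  | succ n ih =>
    have hcast : ((n + 1 : Nat) : Int) = (n : Int) + 1 := by push_cast; ring
    rw [hcast, PySem.List.pyRange_one_succ_right (by positivity), List.filterMap_append,
      pv_step hnd hva0 hvalt (by positivity), ih]
    by_cases hc : PySem.Int.mod (n : Int) nd = va
    · rw [if_pos hc, PySem.List.enumerate_append, List.map_append]
      congr 1
      simp only [List.filterMap_cons, List.filterMap_nil, pvG, if_pos hc,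
        PySem.List.enumerate_cons, PySem.List.enumerate_nil, List.map_cons, List.map_nil, pvg]
      have hlen := pv_len hnd hva0 hvalt (by positivity : (0:Int) ≤ (n:Int)) hc
      rw [Int.shiftLeft_natCast_right]
      have he : ((0 + ((PySem.List.pyRange va ((n:Nat) : Int) nd).length : Int)).toNat)
          = (PySem.Int.floordiv ((n:Nat) : Int) nd).toNat := by omega
      rw [he]
    · rw [if_neg hc]
      simp [pvG, hc]


theorem pv_mod_bounds_pos {a b : Int} (hb : 0 < b) :
    0 ≤ PySem.Int.mod a b ∧ PySem.Int.mod a b < b := by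
  rw [PySem.Int.mod_eq_emod_of_pos hb]
  exact ⟨Int.emod_nonneg a (ne_of_gt hb), Int.emod_lt_of_pos a hb⟩

theorem pv_filterMap_nil_of_none {nq nd va : Int}
    (h : ∀ mb : Int, 0 ≤ mb → mb < nq → PySem.Int.mod mb nd ≠ va) :
    (PySem.List.pyRange 0 nq 1).filterMap (pvG nq nd va) = [] := by
  rw [List.filterMap_eq_nil_iff]
  intro mb hmb
  have hb := PySem.List.mem_pyRange_one.mp hmb
  unfold pvG
  rw [if_neg (h mb hb.1 hb.2)]

-- ===== VERDICT (by name: the statement is the Claim_ definition above) =====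
theorem v_bit_sites_py_spec : Claim_equal_v_bit_sites_py := by
  unfold Claim_equal_v_bit_sites_py
  intro nq nd va _ hnd
  unfold Spec_v_bit_sites_py
  by_cases hax : 0 ≤ va ∧ va < nd
  · obtain ⟨hva0, hvalt⟩ := hax
    show v_bit_sites_py nq nd va
        = if ¬ (0 ≤ va ∧ va < nd) then []
          else ((PySem.List.enumerate (PySem.List.pyRange va nq nd)).map
            (fun p => (nq - 1 - p.2, (1 : Int) <<< (p.1.toNat : Int)))).reverse
    rw [if_neg (by omega : ¬ ¬ (0 ≤ va ∧ va < nd)), pvA_eq]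
    congr 1
    by_cases hq : nq ≤ 0
    · rw [PySem.List.pyRange_one_eq_nil hq, PySem.List.pyRange_of_pos _ _ hnd,
        if_neg (by omega : ¬ va < nq)]
      simp [PySem.List.enumerate_nil]
    · have hcp := pv_core_pos (nq := nq) hnd hva0 hvalt nq.toNat
      rw [show ((nq.toNat : Nat) : Int) = nq from by omega] at hcp
      exact hcp
  · -- v_axis names no axis: both sides are empty
    show v_bit_sites_py nq nd va
        = if ¬ (0 ≤ va ∧ va < nd) then []
          else ((PySem.List.enumerate (PySem.List.pyRange va nq nd)).map
            (fun p => (nq - 1 - p.2, (1 : Int) <<< (p.1.toNat : Int)))).reverse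
    rw [if_pos hax, pvA_eq, pv_filterMap_nil_of_none, List.reverse_nil]
    intro mb _ _ hcmb
    have hb2 := pv_mod_bounds_pos (a := mb) (b := nd) hnd
    exact hax ⟨hcmb ▸ hb2.1, hcmb ▸ hb2.2⟩
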